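-- pv_equiv track=rewrite | github.com/sangram2093/gcp_migration | jira_health_status.py | build_node_order
-- ===== SOURCE A (Python) =====
-- from typing import Any, Dict, List, Optional, Set, Tuple
--
-- def build_node_order(root_key: str, edges: Dict[str, List[str]]) -> List[Tuple[str, int]]:
--     ordered: List[Tuple[str, int]] = []
--     seen: Set[str] = set()
--     stack: List[Tuple[str, int]] = [(root_key, 0)]
--
--     while stack:
--         node, depth = stack.pop()
--         if node in seen:
--             continue
--         seen.add(node)
--         ordered.append((node, depth))
--         children = edges.get(node, [])
--         for child in reversed(children):
--             stack.append((child, depth + 1))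
--
--     return ordered
-- ===== SOURCE B (Python) =====
-- def build_node_order(root_key, edges):
--     ordered = []
--     seen = set()
--
--     def visit(node, depth):
--         if node in seen:
--             return
--         seen.add(node)
--         ordered.append((node, depth))
--         for child in edges.get(node, []):
--             visit(child, depth + 1)
--
--     visit(root_key, 0)
--     return ordered
-- ===== Notes on version B (the rewrite author's own statement) =====
-- stated objective: simpler
-- what changed: Replaces the explicit stack (with its reversed-children pushes and pop loop) by a direct recursive visit(node, depth) closing over the shared seen set and output list, visiting children in forward order.
import Mathlib
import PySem

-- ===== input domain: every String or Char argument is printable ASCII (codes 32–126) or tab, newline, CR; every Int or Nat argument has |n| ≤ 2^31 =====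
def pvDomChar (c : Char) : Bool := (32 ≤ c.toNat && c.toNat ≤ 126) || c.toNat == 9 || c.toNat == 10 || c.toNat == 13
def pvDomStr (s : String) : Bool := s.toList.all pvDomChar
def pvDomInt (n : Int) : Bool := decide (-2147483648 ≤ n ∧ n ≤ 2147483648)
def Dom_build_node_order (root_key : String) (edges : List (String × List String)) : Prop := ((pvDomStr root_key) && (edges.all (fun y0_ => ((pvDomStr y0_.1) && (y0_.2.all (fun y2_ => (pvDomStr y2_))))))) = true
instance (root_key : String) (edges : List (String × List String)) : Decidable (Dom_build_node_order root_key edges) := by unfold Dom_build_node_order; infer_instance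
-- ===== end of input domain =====

-- B replaces A's explicit stack loop by a recursive visit(node, depth) over the shared seen set
-- and output list (same return value; objective: simpler decomposition).

-- ===== PORT A =====
-- all node names ever pushed on the stack: the root plus every child list in `edges`
def pvFlat (edges : List (String × List String)) : List String := edges.flatMap (fun p => p.2)

def pvAll (root_key : String) (edges : List (String × List String)) : List String :=
  root_key :: pvFlat edges

-- edges.get(node, [])  (first-match association-list lookup)
def pvChildren (edges : List (String × List String)) (node : String) : List String :=
  PySem.Dict.getD (PySem.Dict.mk edges) node []

lemma pvChildren_nil (node : String) : pvChildren [] node = [] := rfl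

lemma pvChildren_cons (k : String) (vs : List String) (rest : List (String × List String))
    (node : String) :
    pvChildren ((k, vs) :: rest) node = if k == node then vs else pvChildren rest node := by
  simp only [pvChildren, PySem.Dict.getD_eq_get?_getD, PySem.Dict.get?_mk_cons]
  by_cases h : k == node <;> simp [h]

lemma pvFlat_cons (k : String) (vs : List String) (rest : List (String × List String)) :
    pvFlat ((k, vs) :: rest) = vs ++ pvFlat rest := by simp [pvFlat]

lemma pvChildren_sub (edges : List (String × List String)) (node x : String)
    (hx : x ∈ pvChildren edges node) : x ∈ pvFlat edges := by
  induction edges with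
  | nil => simp [pvChildren_nil] at hx
  | cons p rest ih =>
    obtain ⟨k, vs⟩ := p
    rw [pvChildren_cons] at hx
    rw [pvFlat_cons, List.mem_append]
    by_cases h : k == node
    · rw [if_pos h] at hx; exact Or.inl hx
    · rw [if_neg h] at hx; exact Or.inr (ih hx)

lemma pvChildren_len_le (edges : List (String × List String)) (node : String) :
    (pvChildren edges node).length ≤ (pvFlat edges).length := by
  induction edges with
  | nil => simp [pvChildren_nil]
  | cons p rest ih =>
    obtain ⟨k, vs⟩ := p
    rw [pvChildren_cons, pvFlat_cons, List.length_append]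
    by_cases h : k == node
    · rw [if_pos h]; omega
    · rw [if_neg h]; omega

lemma pvContains_false_iff (s : PySem.Set String) (x : String) :
    PySem.Set.contains s x = false ↔ x ∉ s := by
  rw [← PySem.Set.contains_iff s x]
  cases PySem.Set.contains s x <;> simp

-- termination measure for A's while loop: (pending distinct unvisited names) * (E+2) + stack length
def pvMeas (root_key : String) (edges : List (String × List String))
    (stack : List (String × Int)) (seen : PySem.Set String) : Nat :=
  ((pvAll root_key edges ++ stack.map Prod.fst).toFinset \ seen.toFinset).card
      * ((pvFlat edges).length + 2)
    + stack.length

lemma pvMeas_dec_seen (root_key : String) (edges : List (String × List String))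
    (stack : List (String × Int)) (seen : PySem.Set String) (node : String) (depth : Int)
    (h : stack.getLast? = some (node, depth)) :
    pvMeas root_key edges stack.dropLast seen < pvMeas root_key edges stack seen := by
  have hne : stack ≠ [] := by rintro rfl; simp at h
  have hsub : ((pvAll root_key edges ++ stack.dropLast.map Prod.fst).toFinset \ seen.toFinset)
      ⊆ ((pvAll root_key edges ++ stack.map Prod.fst).toFinset \ seen.toFinset) := by
    apply Finset.sdiff_subset_sdiff _ (Finset.Subset.refl _)
    intro x hx
    simp only [List.mem_toFinset, List.mem_append] at hx ⊢
    rcases hx with hx | hx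
    · exact Or.inl hx
    · exact Or.inr (List.map_subset _ (List.dropLast_subset _) hx)
  have hcard := Finset.card_le_card hsub
  have hlen : stack.dropLast.length = stack.length - 1 := List.length_dropLast
  have hpos : 1 ≤ stack.length := List.length_pos_of_ne_nil hne
  unfold pvMeas
  have := Nat.mul_le_mul_right ((pvFlat edges).length + 2) hcard
  omega

lemma pvMeas_dec_new (root_key : String) (edges : List (String × List String))
    (stack : List (String × Int)) (seen : PySem.Set String) (node : String) (depth : Int)
    (h : stack.getLast? = some (node, depth))
    (hseen : PySem.Set.contains seen node = false) :
    pvMeas root_key edges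
      (stack.dropLast ++ (pvChildren edges node).reverse.map (fun c => (c, depth + 1)))
      (PySem.Set.add seen node)
      < pvMeas root_key edges stack seen := by
  have hne : stack ≠ [] := by rintro rfl; simp at h
  have hmem : (node, depth) ∈ stack := List.mem_of_getLast? h
  have hnodestack : node ∈ stack.map Prod.fst := List.mem_map_of_mem hmem
  have hnodenotseen : node ∉ seen := (pvContains_false_iff seen node).mp hseen
  -- strict Finset decrease
  have hsub : ((pvAll root_key edges ++
        (stack.dropLast ++ (pvChildren edges node).reverse.map (fun c => (c, depth + 1))).map Prod.fst).toFinset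
          \ (PySem.Set.add seen node).toFinset)
      ⊆ ((pvAll root_key edges ++ stack.map Prod.fst).toFinset \ seen.toFinset) := by
    intro x hx
    rw [Finset.mem_sdiff] at hx ⊢
    obtain ⟨hx1, hx2⟩ := hx
    constructor
    · simp only [List.mem_toFinset, List.mem_append, List.map_append, List.mem_map] at hx1 ⊢
      rcases hx1 with hx1 | hx1 | hx1
      · exact Or.inl hx1
      · rcases hx1 with ⟨p, hp, hpe⟩
        exact Or.inr ⟨p, List.dropLast_subset _ hp, hpe⟩
      · rcases hx1 with ⟨p, hp, rfl⟩
        rcases List.mem_map.mp (by simpa using hp) with ⟨c, hc, rfl⟩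
        exact Or.inl (List.mem_cons_of_mem _ (pvChildren_sub edges node _ (by simpa using hc)))
    · intro hc
      apply hx2
      rw [List.mem_toFinset] at hc ⊢
      exact (PySem.Set.mem_add _ _ _).mpr (Or.inl hc)
  have hnotsub : ¬ ((pvAll root_key edges ++ stack.map Prod.fst).toFinset \ seen.toFinset)
      ⊆ ((pvAll root_key edges ++
        (stack.dropLast ++ (pvChildren edges node).reverse.map (fun c => (c, depth + 1))).map Prod.fst).toFinset
          \ (PySem.Set.add seen node).toFinset) := by
    intro hc
    have hin : node ∈ ((pvAll root_key edges ++ stack.map Prod.fst).toFinset \ seen.toFinset) := by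
      rw [Finset.mem_sdiff, List.mem_toFinset, List.mem_toFinset]
      exact ⟨List.mem_append.mpr (Or.inr hnodestack), hnodenotseen⟩
    have := hc hin
    rw [Finset.mem_sdiff, List.mem_toFinset] at this
    exact this.2 (List.mem_toFinset.mpr ((PySem.Set.mem_add _ _ _).mpr (Or.inr rfl)))
  have hcard := Finset.card_lt_card (Finset.ssubset_def.mpr ⟨hsub, hnotsub⟩)
  have hlen : stack.dropLast.length = stack.length - 1 := List.length_dropLast
  have hpos : 1 ≤ stack.length := List.length_pos_of_ne_nil hne
  have hch := pvChildren_len_le edges node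
  unfold pvMeas
  have := Nat.mul_le_mul_right ((pvFlat edges).length + 2) hcard
  have h2 : ((pvAll root_key edges ++
        (stack.dropLast ++ (pvChildren edges node).reverse.map (fun c => (c, depth + 1))).map Prod.fst).toFinset
          \ (PySem.Set.add seen node).toFinset).card + 1
      ≤ ((pvAll root_key edges ++ stack.map Prod.fst).toFinset \ seen.toFinset).card := hcard
  have h3 : (stack.dropLast ++ (pvChildren edges node).reverse.map (fun c => (c, depth + 1))).length
      ≤ stack.length - 1 + (pvFlat edges).length := by
    simp [List.length_append]; omega
  have h4 := Nat.mul_le_mul_right ((pvFlat edges).length + 2) h2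
  rw [Nat.succ_mul] at h4
  omega

-- the while loop of A: stack (top = last element), seen, ordered; returns (seen, ordered)
def pvALoop (root_key : String) (edges : List (String × List String))
    (stack : List (String × Int)) (seen : PySem.Set String) (ordered : List (String × Int)) :
    PySem.Set String × List (String × Int) :=
  match h : stack.getLast? with
  | none => (seen, ordered)                               -- while stack: exhausted
  | some (node, depth) =>                                 -- node, depth = stack.pop()
    if hs : PySem.Set.contains seen node then
      pvALoop root_key edges stack.dropLast seen ordered  -- continue
    else
      pvALoop root_key edges
        (stack.dropLast ++ (pvChildren edges node).reverse.map (fun c => (c, depth + 1)))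
        (PySem.Set.add seen node)
        (ordered ++ [(node, depth)])
termination_by pvMeas root_key edges stack seen
decreasing_by
  · exact pvMeas_dec_seen root_key edges stack seen node depth h
  · exact pvMeas_dec_new root_key edges stack seen node depth h (by simpa using hs)

def build_node_order (root_key : String) (edges : List (String × List String)) :
    List (String × Int) :=
  (pvALoop root_key edges [(root_key, 0)] PySem.Set.empty []).2

-- ===== PORT B =====
-- visit(node, depth) closing over (seen, ordered); the fuel is a totality guard only
-- (the run never exhausts it: one unit is consumed exactly when a new node enters `seen`).
def pvVisit (edges : List (String × List String)) (fuel : Nat)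
    (node : String) (depth : Int) (st : PySem.Set String × List (String × Int)) :
    PySem.Set String × List (String × Int) :=
  match fuel with
  | 0 => st
  | f + 1 =>
    if PySem.Set.contains st.1 node then st
    else
      (pvChildren edges node).foldl (fun s c => pvVisit edges f c (depth + 1) s)
        (PySem.Set.add st.1 node, st.2 ++ [(node, depth)])

def build_node_order_alt (root_key : String) (edges : List (String × List String)) :
    List (String × Int) :=
  (pvVisit edges ((pvFlat edges).length + 2) root_key 0 (PySem.Set.empty, [])).2

-- ===== PRECONDITION & SPEC =====
def Spec_build_node_order (root_key : String) (edges : List (String × List String)) (out : List (String × Int)) : Prop := out = build_node_order_alt root_key edges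
instance (root_key : String) (edges : List (String × List String)) (out : List (String × Int)) : Decidable (Spec_build_node_order root_key edges out) := by unfold Spec_build_node_order; infer_instance

-- ===== CLAIM (what is proved, stated in full; the proofs are below) =====
def Claim_equal_build_node_order : Prop := ∀ (root_key : String) (edges : List (String × List String)), Dom_build_node_order root_key edges → Spec_build_node_order root_key edges (build_node_order root_key edges)

-- ===== LEMMAS AND PROOFS =====

-- distinct names of pvAll not yet in seen
def pvUnseen (root_key : String) (edges : List (String × List String))
    (seen : PySem.Set String) : Nat :=
  ((PySem.List.dedup (pvAll root_key edges)).filter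
    (fun x => !(PySem.Set.contains seen x))).length

lemma pvFilter_le {α : Type} (l : List α) (p q : α → Bool)
    (h : ∀ x ∈ l, p x = true → q x = true) :
    (l.filter p).length ≤ (l.filter q).length := by
  induction l with
  | nil => simp
  | cons a l ih =>
    have ih' := ih (fun x hx => h x (List.mem_cons_of_mem _ hx))
    by_cases hp : p a = true
    · simp [hp, h a (List.mem_cons_self) hp]; omega
    · simp only [List.filter_cons, Bool.not_eq_true] at *
      rw [hp]
      by_cases hq : q a = true <;> simp [hq] <;> omega

lemma pvFilter_lt {α : Type} (l : List α) (p q : α → Bool) (a : α)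
    (ha : a ∈ l) (hqa : q a = true) (hpa : p a = false)
    (h : ∀ x ∈ l, p x = true → q x = true) :
    (l.filter p).length < (l.filter q).length := by
  induction l with
  | nil => simp at ha
  | cons b l ih =>
    have hle := pvFilter_le l p q (fun x hx => h x (List.mem_cons_of_mem _ hx))
    rcases List.mem_cons.mp ha with rfl | ha'
    · simp [hpa, hqa]; omega
    · have ih' := ih ha' (fun x hx => h x (List.mem_cons_of_mem _ hx))
      by_cases hp : p b = true
      · simp [hp, h b (List.mem_cons_self) hp]; omega
      · simp only [List.filter_cons, Bool.not_eq_true] at *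
        rw [hp]
        by_cases hq : q b = true <;> simp [hq] <;> omega

lemma pvUnseen_mono (root_key : String) (edges : List (String × List String))
    (s s' : PySem.Set String) (h : ∀ x, x ∈ s → x ∈ s') :
    pvUnseen root_key edges s' ≤ pvUnseen root_key edges s := by
  apply pvFilter_le
  intro x _ hx
  rw [Bool.not_eq_true', pvContains_false_iff] at hx ⊢
  exact fun hm => hx (h x hm)

lemma pvUnseen_add_lt (root_key : String) (edges : List (String × List String))
    (seen : PySem.Set String) (node : String)
    (hmem : node ∈ pvAll root_key edges)
    (hseen : PySem.Set.contains seen node = false) :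
    pvUnseen root_key edges (PySem.Set.add seen node) < pvUnseen root_key edges seen := by
  apply pvFilter_lt _ _ _ node
  · rw [PySem.List.mem_dedup]; exact hmem
  · rw [Bool.not_eq_true', hseen]
  · simp [PySem.Set.mem_add]
  · intro x _ hx
    rw [Bool.not_eq_true', pvContains_false_iff] at hx ⊢
    exact fun hm => hx ((PySem.Set.mem_add _ _ _).mpr (Or.inl hm))

-- unfolding equations of A's loop
lemma pvALoop_nil (root_key : String) (edges : List (String × List String))
    (seen : PySem.Set String) (ordered : List (String × Int)) :
    pvALoop root_key edges [] seen ordered = (seen, ordered) := by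
  rw [pvALoop]
  split
  · rfl
  · next h => simp at h

lemma pvALoop_concat (root_key : String) (edges : List (String × List String))
    (l : List (String × Int)) (node : String) (depth : Int)
    (seen : PySem.Set String) (ordered : List (String × Int)) :
    pvALoop root_key edges (l ++ [(node, depth)]) seen ordered =
      if PySem.Set.contains seen node then pvALoop root_key edges l seen ordered
      else pvALoop root_key edges
        (l ++ (pvChildren edges node).reverse.map (fun c => (c, depth + 1)))
        (PySem.Set.add seen node) (ordered ++ [(node, depth)]) := by
  have hg : (l ++ [(node, depth)]).getLast? = some (node, depth) := List.getLast?_concat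
  rw [pvALoop]
  split
  · next h => rw [hg] at h; exact absurd h (by simp)
  · next n' d' h =>
    rw [hg] at h
    injection h with h'
    injection h' with h1 h2
    subst h1; subst h2
    simp only [List.dropLast_concat, dite_eq_ite]

lemma pvVisit_mono (edges : List (String × List String)) :
    ∀ (f : Nat) (node : String) (depth : Int)
      (st : PySem.Set String × List (String × Int)) (x : String),
      x ∈ st.1 → x ∈ (pvVisit edges f node depth st).1 := by
  intro f
  induction f with
  | zero => intro node depth st x hx; simpa [pvVisit] using hx
  | succ f ih =>
    intro node depth st x hx
    rw [pvVisit]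
    split
    · exact hx
    · have aux : ∀ (cs : List String) (st' : PySem.Set String × List (String × Int)),
          x ∈ st'.1 →
          x ∈ (cs.foldl (fun s c => pvVisit edges f c (depth + 1) s) st').1 := by
        intro cs
        induction cs with
        | nil => intro st' h; exact h
        | cons c cs ihc =>
          intro st' h
          exact ihc _ (ih c (depth + 1) st' x h)
      exact aux _ _ ((PySem.Set.mem_add _ _ _).mpr (Or.inl hx))

lemma pvALoop_split (root_key : String) (edges : List (String × List String)) :
    ∀ (k : Nat) (l1 : List (String × Int)) (seen : PySem.Set String)
      (ordered : List (String × Int)) (l2 : List (String × Int)),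
      (∀ p ∈ l1, p.1 ∈ pvAll root_key edges) →
      pvUnseen root_key edges seen * ((pvFlat edges).length + 1) + l1.length ≤ k →
      pvALoop root_key edges (l2 ++ l1) seen ordered =
        pvALoop root_key edges l2 (pvALoop root_key edges l1 seen ordered).1
          (pvALoop root_key edges l1 seen ordered).2 := by
  intro k
  induction k with
  | zero =>
    intro l1 seen ordered l2 _ hk
    have : l1 = [] := by
      cases l1 with
      | nil => rfl
      | cons p l => simp at hk
    subst this
    simp [pvALoop_nil, List.append_nil]
  | succ k ih =>
    intro l1 seen ordered l2 hinv hk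
    rcases List.eq_nil_or_concat l1 with rfl | ⟨l1', x, rfl⟩
    · simp [pvALoop_nil, List.append_nil]
    · obtain ⟨n, d⟩ := x
      simp only [List.concat_eq_append] at hinv hk ⊢
      rw [← List.append_assoc, pvALoop_concat, pvALoop_concat]
      by_cases hc : PySem.Set.contains seen n = true
      · rw [if_pos hc, if_pos hc]
        exact ih l1' seen ordered l2
          (fun p hp => hinv p (List.mem_append_left _ hp))
          (by simp at hk ⊢; omega)
      · rw [if_neg hc, if_neg hc, List.append_assoc]
        have hcf : PySem.Set.contains seen n = false := by
          revert hc; cases PySem.Set.contains seen n <;> simp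
        have hnall : n ∈ pvAll root_key edges :=
          hinv (n, d) (List.mem_append_right _ (List.mem_cons_self))
        have hlt := pvUnseen_add_lt root_key edges seen n hnall hcf
        have hch := pvChildren_len_le edges n
        apply ih
        · intro p hp
          rcases List.mem_append.mp hp with hp | hp
          · exact hinv p (List.mem_append_left _ hp)
          · rcases List.mem_map.mp hp with ⟨c, hcm, rfl⟩
            exact List.mem_cons_of_mem _
              (pvChildren_sub edges n c (by simpa using hcm))
        · have h1 : pvUnseen root_key edges (PySem.Set.add seen n) + 1
              ≤ pvUnseen root_key edges seen := hlt
          have h2 := Nat.mul_le_mul_right ((pvFlat edges).length + 1) h1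
          rw [Nat.succ_mul] at h2
          simp only [List.length_append, List.length_map, List.length_reverse,
            List.length_cons, List.length_nil] at hk ⊢
          omega

lemma pvALoop_visit (root_key : String) (edges : List (String × List String)) :
    ∀ (u f : Nat) (n : String) (d : Int) (seen : PySem.Set String)
      (ordered : List (String × Int)),
      n ∈ pvAll root_key edges →
      pvUnseen root_key edges seen ≤ u → u + 1 ≤ f →
      pvALoop root_key edges [(n, d)] seen ordered = pvVisit edges f n d (seen, ordered) := by
  intro u
  induction u using Nat.strong_induction_on with
  | _ u ihu =>
  intro f n d seen ordered hn hu hf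
  obtain ⟨f, rfl⟩ : ∃ f', f = f' + 1 := ⟨f - 1, by omega⟩
  rw [show [(n, d)] = ([] : List (String × Int)) ++ [(n, d)] from rfl,
    pvALoop_concat, pvVisit]
  by_cases hc : PySem.Set.contains seen n = true
  · rw [if_pos hc, pvALoop_nil]
    have : PySem.Set.contains (Prod.fst (seen, ordered)) n = true := hc
    rw [if_pos this]
  · have hcf : PySem.Set.contains seen n = false := by
      revert hc; cases PySem.Set.contains seen n <;> simp
    rw [if_neg hc]
    have : ¬ PySem.Set.contains (Prod.fst (seen, ordered)) n = true := hc
    rw [if_neg this]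
    have hlt := pvUnseen_add_lt root_key edges seen n hn hcf
    have hupos : 1 ≤ u := by omega
    -- the for-loop over the children, against the remaining stack segment
    have fold : ∀ (cs : List String) (s : PySem.Set String) (o : List (String × Int)),
        (∀ c ∈ cs, c ∈ pvAll root_key edges) →
        pvUnseen root_key edges s ≤ u - 1 →
        pvALoop root_key edges (cs.reverse.map (fun c => (c, d + 1))) s o =
          cs.foldl (fun s c => pvVisit edges f c (d + 1) s) (s, o) := by
      intro cs
      induction cs with
      | nil => intro s o _ _; simp [pvALoop_nil]
      | cons c cs ihc =>
        intro s o hcs hs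
        have hrw : ((c :: cs).reverse.map (fun c => (c, d + 1)))
            = cs.reverse.map (fun c => (c, d + 1)) ++ [(c, d + 1)] := by simp
        rw [hrw,
          pvALoop_split root_key edges
            (pvUnseen root_key edges s * ((pvFlat edges).length + 1) + 1)
            [(c, d + 1)] s o (cs.reverse.map (fun c => (c, d + 1)))
            (fun p hp => by
              rcases List.mem_singleton.mp hp with rfl
              exact hcs c List.mem_cons_self)
            (by simp)]
        have hc1 : pvALoop root_key edges [(c, d + 1)] s o
            = pvVisit edges f c (d + 1) (s, o) :=
          ihu (u - 1) (by omega) f c (d + 1) s o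
            (hcs c List.mem_cons_self) hs (by omega)
        rw [hc1, List.foldl_cons]
        have hmono : pvUnseen root_key edges (pvVisit edges f c (d + 1) (s, o)).1
            ≤ u - 1 :=
          le_trans
            (pvUnseen_mono root_key edges s _
              (fun x hx => pvVisit_mono edges f c (d + 1) (s, o) x hx))
            hs
        have := ihc (pvVisit edges f c (d + 1) (s, o)).1
          (pvVisit edges f c (d + 1) (s, o)).2
          (fun c' hc' => hcs c' (List.mem_cons_of_mem _ hc'))
          hmono
        rw [this, Prod.mk.eta]
    rw [List.nil_append]
    exact fold (pvChildren edges n) (PySem.Set.add seen n) (ordered ++ [(n, d)])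
      (fun c hcm => List.mem_cons_of_mem _ (pvChildren_sub edges n c hcm))
      (by omega)

theorem build_node_order_spec : Claim_equal_build_node_order := by
  intro root_key edges _
  unfold Spec_build_node_order build_node_order build_node_order_alt
  have hbound : pvUnseen root_key edges PySem.Set.empty ≤ (pvFlat edges).length + 1 := by
    calc pvUnseen root_key edges PySem.Set.empty
        ≤ (PySem.List.dedup (pvAll root_key edges)).length := List.length_filter_le _ _
      _ ≤ (pvAll root_key edges).length := by
          rw [PySem.List.dedup_eq_ofList]; exact PySem.Set.length_ofList_le _
      _ = (pvFlat edges).length + 1 := by simp [pvAll]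
  rw [pvALoop_visit root_key edges ((pvFlat edges).length + 1) ((pvFlat edges).length + 2)
    root_key 0 PySem.Set.empty [] List.mem_cons_self hbound (by omega)]
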